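-- pv_equiv track=rewrite | github.com/Me2yhm/quo-le | diff.py | get_second_first
-- ===== SOURCE A (Python) =====
-- def compare_time_first(s1: str, s2: str):
--     if s1 == s2:
--         return s1
--     if s1 == "":
--         return s1
--     if s2 == "":
--         return s2
--     if int(s1[0]) < int(s2[0]):
--         return s1
--     elif int(s1[0]) > int(s2[0]):
--         return s2
--     else:
--         return s1[0] + compare_time_first(s1[1:], s2[1:])
--
-- def is_first(s1, s2):
--     if s1 == compare_time_first(s1, s2) and s1 != s2:
--         return True
--     else:
--         return False
--
-- def get_second_first(times):
--     scecond_first = []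
--     for t in times:
--         if len(scecond_first) == 0:
--             scecond_first.append(t)
--         if t[:8] != scecond_first[-1][:8]:
--             scecond_first.append(t)
--         else:
--             s1 = t[8:]
--             s2 = scecond_first[-1][8:]
--             if is_first(s2, s1):
--                 continue
--             else:
--                 scecond_first[-1] = t
--     return scecond_first
-- ===== SOURCE B (Python) =====
-- # B: explicit grouping pass (consecutive equal 8-char prefixes) + per-group left-to-right
-- # reduction with an iterative comparator that skips equal characters and decides at the
-- # first divergence by int(); replace-on-tie (last minimum wins) as in A.
--
-- def _suffix_precedes(a, b):
--     # True iff a is strictly smaller: skip equal chars, compare the first differing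
--     # pair as ints; a proper prefix (shorter string) is smaller, equal is not smaller.
--     for x, y in zip(a, b):
--         if x != y:
--             return int(x) < int(y)
--     return len(a) < len(b)
--
-- def _groups(times):
--     groups = []
--     for t in times:
--         if groups and groups[-1][0][:8] == t[:8]:
--             groups[-1].append(t)
--         else:
--             groups.append([t])
--     return groups
--
-- def get_second_first(times):
--     out = []
--     for g in _groups(times):
--         best = g[0]
--         for t in g[1:]:
--             if not _suffix_precedes(best[8:], t[8:]):
--                 best = t
--         out.append(best)
--     return out
-- ===== Notes on version B (the rewrite author's own statement) =====
-- stated objective: alternative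
-- what changed: A's single loop that appends/overwrites the last slot of the result while comparing suffixes with a recursive string-rebuilding comparator is replaced by an explicit grouping pass over consecutive equal 8-char prefixes followed by a per-group left-to-right best-suffix reduction using an iterative skip-equal-then-int comparator.
-- outside the precondition, e.g. on get_second_first(['AAAAAAAA1a', 'AAAAAAAA0b', 'AAAAAAAA1x']): A returns ['AAAAAAAA0b'], B returns ['AAAAAAAA0b']; on get_second_first(['AAAAAAAA1a', 'AAAAAAAA1b']): A raises ValueError, B raises ValueError
import Mathlib
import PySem

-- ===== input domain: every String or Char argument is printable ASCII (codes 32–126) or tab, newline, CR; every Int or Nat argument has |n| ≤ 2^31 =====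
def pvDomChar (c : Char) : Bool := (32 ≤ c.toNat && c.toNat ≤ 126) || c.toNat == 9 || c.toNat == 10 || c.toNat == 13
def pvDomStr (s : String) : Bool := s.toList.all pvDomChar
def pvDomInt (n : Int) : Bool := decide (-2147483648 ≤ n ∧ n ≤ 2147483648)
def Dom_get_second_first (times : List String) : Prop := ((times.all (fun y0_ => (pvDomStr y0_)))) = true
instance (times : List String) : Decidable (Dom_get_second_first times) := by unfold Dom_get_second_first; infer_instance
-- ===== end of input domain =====

-- B replaces A's in-place append/replace scan plus recursive comparator by an explicit
-- consecutive-prefix grouping pass, a per-group left-to-right reduction, and an iterative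
-- skip-equal-then-int comparator (objective: alternative decomposition, same asymptotic cost).

-- ===== PORT A =====
-- compare_time_first: recursive digit comparison; int(c) ported as PySem.Int.ofChars? [c]
-- (none = ValueError, excluded by Pre_).
def pvCmpA : List Char → List Char → Option (List Char)
  | s1, s2 =>
    if s1 = s2 then some s1
    else
      match s1, s2 with
      | [], _ => some []
      | _ :: _, [] => some []
      | c1 :: t1, c2 :: t2 =>
        match PySem.Int.ofChars? [c1], PySem.Int.ofChars? [c2] with
        | some n1, some n2 =>
          if n1 < n2 then some (c1 :: t1)
          else if n2 < n1 then some (c2 :: t2)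
          else (pvCmpA t1 t2).map (fun r => c1 :: r)
        | _, _ => none

-- is_first
def pvIsFirstA (s1 s2 : List Char) : Option Bool :=
  match pvCmpA s1 s2 with
  | some r => some (s1 == r && s1 != s2)
  | none => none

-- loop body of get_second_first; the accumulator is the result list reversed
-- (head = scecond_first[-1]); slices t[:8] / t[8:] are List.take 8 / List.drop 8 on toList.
def pvStepA (acc : List String) (t : String) : List String :=
  let acc1 := if acc.length = 0 then t :: acc else acc
  match acc1 with
  | last :: rest =>
    if t.toList.take 8 ≠ last.toList.take 8 then t :: last :: rest
    else
      match pvIsFirstA (last.toList.drop 8) (t.toList.drop 8) with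
      | some true => last :: rest          -- continue
      | some false => t :: rest            -- scecond_first[-1] = t
      | none => t :: rest                  -- ValueError in Python; outside Pre_
  | [] => []                               -- unreachable: acc1 is never empty

def get_second_first (times : List String) : List String :=
  (times.foldl pvStepA []).reverse

-- ===== PORT B =====
-- _suffix_precedes: skip equal characters, decide at the first divergence by int()
-- (none = ValueError, outside Pre_); a proper prefix is smaller.
def pvSufLtB : List Char → List Char → Option Bool
  | x :: xs, y :: ys =>
    if x = y then pvSufLtB xs ys
    else
      match PySem.Int.ofChars? [x], PySem.Int.ofChars? [y] with
      | some dx, some dy => some (decide (dx < dy))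
      | _, _ => none
  | a, b => some (decide (a.length < b.length))

-- _groups: loop body; groups kept in reverse order (head = current open group, in order)
def pvGroupStepB (acc : List (List String)) (t : String) : List (List String) :=
  match acc with
  | g :: rest =>
    match g with
    | g0 :: _ =>
      if g0.toList.take 8 = t.toList.take 8 then (g ++ [t]) :: rest
      else [t] :: g :: rest
    | [] => [t] :: g :: rest               -- unreachable: groups are never empty
  | [] => [[t]]

def pvGroupsB (times : List String) : List (List String) :=
  (times.foldl pvGroupStepB []).reverse

-- per-group reduction: best = g[0], replaced unless it strictly precedes
def pvBestB (best : String) : List String → Option String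
  | [] => some best
  | t :: ts =>
    match pvSufLtB (best.toList.drop 8) (t.toList.drop 8) with
    | some true => pvBestB best ts
    | some false => pvBestB t ts
    | none => none                         -- ValueError in Python; outside Pre_

def pvEmitStepB (out : List String) (g : List String) : List String :=
  match g with
  | g0 :: gr =>
    match pvBestB g0 gr with
    | some b => out ++ [b]
    | none => out                          -- ValueError in Python; outside Pre_
  | [] => out                              -- unreachable: groups are never empty

def get_second_first_alt (times : List String) : List String :=
  (pvGroupsB times).foldl pvEmitStepB []

-- ===== PRECONDITION & SPEC =====
-- a pair of suffixes is safe to compare iff they are equal (A short-circuits before any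
-- int()) or: the characters of their common prefix are all digits and the first diverging
-- pair of characters are both digits (so int() is only ever applied to digits)
def pvGoodC (a b : List Char) : Bool :=
  a == b ||
    (((a.zip b).takeWhile (fun p => p.1 == p.2)).all (fun p => p.1.isDigit) &&
      match (a.zip b).dropWhile (fun p => p.1 == p.2) with
      | [] => true
      | p :: _ => p.1.isDigit && p.2.isDigit)

-- pvRunGoodC a ts: a's suffix is safe against the suffix of every element of the leading
-- run of ts whose 8-char prefix equals a's
def pvRunGoodC (a : String) (ts : List String) : Bool :=
  (ts.takeWhile (fun t => t.toList.take 8 == a.toList.take 8)).all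
    (fun t => pvGoodC (a.toList.drop 8) (t.toList.drop 8))

def pvRunHeadC : List String → Bool
  | [] => true
  | a :: rest => pvRunGoodC a rest

def pvPreChk (times : List String) : Bool := times.tails.all pvRunHeadC

-- Pre_ excludes lists in which some consecutive same-8-char-prefix group contains a pair of
-- suffixes whose comparison would hit int() on a non-digit character: A raises ValueError on
-- almost all of these, and on the few where an intervening smaller element keeps the bad pair
-- from ever being compared, A returns and B returns the same value (see claim.json "cites").
def Pre_get_second_first (times : List String) : Prop := pvPreChk times = true
instance (times : List String) : Decidable (Pre_get_second_first times) := by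
  unfold Pre_get_second_first; infer_instance

def pvWitness_get_second_first : List String :=
  ["20240101093000", "20240101093100", "20240102080000", "20240102075900"]

def Spec_get_second_first (times : List String) (out : List String) : Prop := out = get_second_first_alt times
instance (times : List String) (out : List String) : Decidable (Spec_get_second_first times out) := by unfold Spec_get_second_first; infer_instance

-- ===== CLAIM (what is proved, stated in full; the proofs are below) =====
def Claim_equal_get_second_first : Prop := ∀ (times : List String), Dom_get_second_first times → Pre_get_second_first times → Spec_get_second_first times (get_second_first times)

-- ===== LEMMAS AND PROOFS =====

-- recursive restatements of the precondition, used by the induction proofs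
def pvGoodB : List Char → List Char → Bool
  | x :: xs, y :: ys => if x = y then x.isDigit && pvGoodB xs ys else (x.isDigit && y.isDigit)
  | _, _ => true

def pvGood (a b : List Char) : Bool := a == b || pvGoodB a b

def pvRunGood (a : String) : List String → Bool
  | [] => true
  | t :: ts =>
    if t.toList.take 8 = a.toList.take 8 then
      pvGood (a.toList.drop 8) (t.toList.drop 8) && pvRunGood a ts
    else true

def pvPreChkR : List String → Bool
  | [] => true
  | a :: l => pvRunGood a l && pvPreChkR l

-- the inline takeWhile/dropWhile test of pvGoodC, as a function of the zipped pair list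
def pvChk (ps : List (Char × Char)) : Bool :=
  (ps.takeWhile (fun p => p.1 == p.2)).all (fun p => p.1.isDigit) &&
    match ps.dropWhile (fun p => p.1 == p.2) with
    | [] => true
    | p :: _ => p.1.isDigit && p.2.isDigit

theorem goodB_chk (a : List Char) : ∀ b, pvGoodB a b = pvChk (a.zip b) := by
  induction a with
  | nil => intro b; cases b <;> simp [pvGoodB, pvChk]
  | cons x xs ih =>
    intro b
    cases b with
    | nil => simp [pvGoodB, pvChk]
    | cons y ys =>
      by_cases hxy : x = y
      · have hb : (x == y) = true := by simpa using hxy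
        simp only [pvGoodB, pvChk, List.zip_cons_cons, List.takeWhile_cons,
          List.dropWhile_cons, hb, if_pos hxy, if_true, List.all_cons]
        rw [ih ys, pvChk]
        cases x.isDigit <;> simp
      · have hb : (x == y) = false := by simpa using hxy
        simp only [pvGoodB, pvChk, List.zip_cons_cons, List.takeWhile_cons,
          List.dropWhile_cons, hb, if_neg hxy, Bool.false_eq_true, if_false, List.all_nil]
        simp

theorem goodC_eq (a b : List Char) : pvGoodC a b = pvGood a b := by
  have h : pvGoodC a b = (a == b || pvChk (a.zip b)) := rfl
  rw [h, pvGood, ← goodB_chk]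

theorem runGoodC_eq (a : String) (ts : List String) : pvRunGoodC a ts = pvRunGood a ts := by
  induction ts with
  | nil => rfl
  | cons t ts ih =>
    rw [pvRunGoodC, pvRunGood]
    by_cases hp : t.toList.take 8 = a.toList.take 8
    · rw [if_pos hp]
      have hb : (t.toList.take 8 == a.toList.take 8) = true := by simpa using hp
      have htw : List.takeWhile (fun t => t.toList.take 8 == a.toList.take 8) (t :: ts) =
          t :: List.takeWhile (fun t => t.toList.take 8 == a.toList.take 8) ts := by
        simp [hb]
      rw [htw, List.all_cons, goodC_eq, ← ih, pvRunGoodC]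
    · rw [if_neg hp]
      have hb : (t.toList.take 8 == a.toList.take 8) = false := by simpa using hp
      simp [hb]

theorem preChk_eq (l : List String) : pvPreChk l = pvPreChkR l := by
  induction l with
  | nil => rfl
  | cons a l ih =>
    rw [pvPreChk, pvPreChkR, List.tails_cons, List.all_cons, ← ih, pvPreChk,
      pvRunHeadC, runGoodC_eq]

-- total strict comparator used only in proofs: char-wise on safe pairs, shorter first
def pvLtC : List Char → List Char → Bool
  | x :: xs, y :: ys => if x = y then pvLtC xs ys else decide (x.toNat < y.toNat)
  | a, b => decide (a.length < b.length)

-- canonical recursion both ports are reduced to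
def pvGoC (best : String) : List String → List String
  | [] => [best]
  | t :: ts =>
    if t.toList.take 8 = best.toList.take 8 then
      pvGoC (if pvLtC (best.toList.drop 8) (t.toList.drop 8) then best else t) ts
    else best :: pvGoC t ts

-- goodness of two suffixes, in proof form
def pvGoodS (a b : String) : Prop := pvGood (a.toList.drop 8) (b.toList.drop 8) = true

theorem char_toNat_inj (c d : Char) (h : c.toNat = d.toNat) : c = d := by
  apply Char.ext; exact UInt32.toNat_inj.mp h

theorem digit_eval (c : Char) (h : c.isDigit = true) :
    PySem.Int.ofChars? [c] = some ((c.toNat : Int) - 48) := by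
  have h1 : 48 ≤ c.toNat ∧ c.toNat ≤ 57 := by
    simp [Char.isDigit, UInt32.le_iff_toNat_le] at h
    exact ⟨h.1, h.2⟩
  obtain ⟨hl, hr⟩ := h1
  interval_cases h2 : (c.toNat) <;>
  · first
    | (have e := char_toNat_inj c '0' (h2.trans (by rfl)); subst e; decide)
    | (have e := char_toNat_inj c '1' (h2.trans (by rfl)); subst e; decide)
    | (have e := char_toNat_inj c '2' (h2.trans (by rfl)); subst e; decide)
    | (have e := char_toNat_inj c '3' (h2.trans (by rfl)); subst e; decide)
    | (have e := char_toNat_inj c '4' (h2.trans (by rfl)); subst e; decide)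
    | (have e := char_toNat_inj c '5' (h2.trans (by rfl)); subst e; decide)
    | (have e := char_toNat_inj c '6' (h2.trans (by rfl)); subst e; decide)
    | (have e := char_toNat_inj c '7' (h2.trans (by rfl)); subst e; decide)
    | (have e := char_toNat_inj c '8' (h2.trans (by rfl)); subst e; decide)
    | (have e := char_toNat_inj c '9' (h2.trans (by rfl)); subst e; decide)

theorem pvLtC_irrefl (a : List Char) : pvLtC a a = false := by
  induction a with
  | nil => decide
  | cons x xs ih => simp [pvLtC, ih]

theorem pvLtC_asymm (a : List Char) : ∀ b, pvLtC a b = true → pvLtC b a = false := by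
  induction a with
  | nil => intro b h; cases b <;> simp_all [pvLtC]
  | cons x xs ih =>
    intro b h
    cases b with
    | nil => simp [pvLtC] at h
    | cons y ys =>
      by_cases hxy : x = y
      · subst hxy
        simp only [pvLtC] at h ⊢
        exact ih ys h
      · simp only [pvLtC, if_neg hxy, if_neg (Ne.symm hxy), decide_eq_true_eq,
          decide_eq_false_iff_not] at h ⊢
        omega

theorem pvLtC_total (a : List Char) : ∀ b, a ≠ b → pvLtC a b = true ∨ pvLtC b a = true := by
  induction a with
  | nil => intro b h; cases b with
    | nil => simp at h
    | cons y ys => left; simp [pvLtC]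
  | cons x xs ih =>
    intro b h
    cases b with
    | nil => right; simp [pvLtC]
    | cons y ys =>
      by_cases hxy : x = y
      · subst hxy
        have : xs ≠ ys := by intro e; exact h (by rw [e])
        simpa [pvLtC] using ih ys this
      · have hne : x.toNat ≠ y.toNat := fun e => hxy (char_toNat_inj _ _ e)
        simp only [pvLtC, if_neg hxy, if_neg (Ne.symm hxy), decide_eq_true_eq]
        omega

-- unpack pvGood on a cons-cons pair
theorem good_cons_eq (x y : Char) (xs ys : List Char) (hxy : x = y)
    (h : pvGood (x :: xs) (y :: ys) = true) : pvGood xs ys = true := by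
  subst hxy
  rw [pvGood, Bool.or_eq_true] at h
  rcases h with h | h
  · simp only [List.cons_beq_cons, Bool.and_eq_true, beq_iff_eq] at h
    simp [pvGood, h.2]
  · rw [pvGoodB, if_pos rfl] at h
    rw [Bool.and_eq_true] at h
    simp [pvGood, h.2]

theorem good_cons_ne (x y : Char) (xs ys : List Char) (hxy : x ≠ y)
    (h : pvGood (x :: xs) (y :: ys) = true) : x.isDigit = true ∧ y.isDigit = true := by
  rw [pvGood, Bool.or_eq_true] at h
  rcases h with h | h
  · simp only [List.cons_beq_cons, Bool.and_eq_true, beq_iff_eq] at h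
    exact absurd h.1 hxy
  · rw [pvGoodB, if_neg hxy, Bool.and_eq_true] at h
    exact h

theorem sufLtB_eval (a : List Char) : ∀ b, pvGood a b = true →
    pvSufLtB a b = some (pvLtC a b) := by
  induction a with
  | nil => intro b _; cases b <;> simp [pvSufLtB, pvLtC]
  | cons x xs ih =>
    intro b h
    cases b with
    | nil => simp [pvSufLtB, pvLtC]
    | cons y ys =>
      by_cases hxy : x = y
      · subst hxy
        rw [pvSufLtB, if_pos rfl, pvLtC, if_pos rfl]
        exact ih ys (good_cons_eq x x xs ys rfl h)
      · obtain ⟨hx, hy⟩ := good_cons_ne x y xs ys hxy h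
        rw [pvSufLtB, if_neg hxy, digit_eval x hx, digit_eval y hy]
        dsimp only
        rw [pvLtC, if_neg hxy]
        congr 1
        have : ((x.toNat : Int) - 48 < (y.toNat : Int) - 48) ↔ (x.toNat < y.toNat) := by omega
        simp [this]

def pvCmpC (a b : List Char) : List Char := if pvLtC b a then b else a

theorem cmpA_eval (a : List Char) : ∀ b, pvGood a b = true →
    pvCmpA a b = some (pvCmpC a b) := by
  induction a with
  | nil =>
    intro b _
    cases b with
    | nil => rfl
    | cons y ys => simp [pvCmpA, pvCmpC, pvLtC]
  | cons x xs ih =>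
    intro b h
    by_cases heq : (x :: xs) = b
    · subst heq
      rw [pvCmpA]
      simp [pvCmpC, pvLtC_irrefl]
    · cases b with
      | nil =>
        rw [pvCmpA]; simp only [if_neg heq]
        simp [pvCmpC, pvLtC]
      | cons y ys =>
        by_cases hxy : x = y
        · subst hxy
          have hne : xs ≠ ys := fun e => heq (by rw [e])
          have hg : pvGood xs ys = true := good_cons_eq x x xs ys rfl h
          have hx : x.isDigit = true := by
            have h2 := h
            rw [pvGood, Bool.or_eq_true] at h2
            rcases h2 with h' | h'
            · exact absurd (by simpa using h') heq
            · rw [pvGoodB, if_pos rfl, Bool.and_eq_true] at h'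
              exact h'.1
          rw [pvCmpA]
          simp only [if_neg heq]
          rw [digit_eval x hx]
          dsimp only
          have h1 : ¬ ((x.toNat : Int) - 48 < (x.toNat : Int) - 48) := by omega
          rw [if_neg h1, if_neg h1]
          rw [ih ys hg]
          simp only [Option.map_some]
          unfold pvCmpC
          rw [pvLtC, if_pos rfl]
          split <;> rfl
        · obtain ⟨hx, hy⟩ := good_cons_ne x y xs ys hxy h
          have hne : x.toNat ≠ y.toNat := fun e => hxy (char_toNat_inj _ _ e)
          rw [pvCmpA]
          simp only [if_neg heq]
          rw [digit_eval x hx, digit_eval y hy]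
          dsimp only
          unfold pvCmpC
          rw [pvLtC, if_neg (Ne.symm hxy)]
          by_cases hlt : x.toNat < y.toNat
          · have h1 : ((x.toNat : Int) - 48 < (y.toNat : Int) - 48) := by omega
            rw [if_pos h1]
            have : ¬ (y.toNat < x.toNat) := by omega
            simp [this]
          · have h1 : ¬ ((x.toNat : Int) - 48 < (y.toNat : Int) - 48) := by omega
            have h2 : ((y.toNat : Int) - 48 < (x.toNat : Int) - 48) := by omega
            rw [if_neg h1, if_pos h2]
            have : (y.toNat < x.toNat) := by omega
            simp [this]

theorem isFirstA_eval (a b : List Char) (h : pvGood a b = true) :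
    pvIsFirstA a b = some (pvLtC a b) := by
  rw [pvIsFirstA, cmpA_eval a b h]
  dsimp only
  congr 1
  by_cases heq : a = b
  · subst heq
    simp [pvLtC_irrefl, pvCmpC]
  · unfold pvCmpC
    by_cases hlt : pvLtC b a = true
    · rw [if_pos hlt]
      have h1 : (a == b) = false := by simp [heq]
      have h2 : pvLtC a b = false := pvLtC_asymm b a hlt
      simp [h1, h2]
    · rw [if_neg hlt]
      have h2 : pvLtC a b = true := by
        rcases pvLtC_total a b heq with h' | h'
        · exact h'
        · exact absurd h' hlt
      simp [heq, h2]

-- unfolding lemmas for the Pre_ checker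
theorem runGood_cons_pos (a t : String) (ts : List String)
    (hp : t.toList.take 8 = a.toList.take 8) (h : pvRunGood a (t :: ts) = true) :
    pvGoodS a t ∧ pvRunGood a ts = true := by
  rw [pvRunGood, if_pos hp, Bool.and_eq_true] at h
  exact h

theorem preChk_cons (a : String) (l : List String) (h : pvPreChkR (a :: l) = true) :
    pvRunGood a l = true ∧ pvPreChkR l = true := by
  rw [pvPreChkR, Bool.and_eq_true] at h
  exact h

theorem stepA_cons (best t : String) (acc : List String) :
    pvStepA (best :: acc) t =
      if t.toList.take 8 ≠ best.toList.take 8 then t :: best :: acc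
      else match pvIsFirstA (best.toList.drop 8) (t.toList.drop 8) with
        | some true => best :: acc
        | some false => t :: acc
        | none => t :: acc := rfl

-- A's loop, reduced to the canonical recursion
theorem A_loop (ts : List String) : ∀ (best : String) (acc : List String),
    pvPreChkR (best :: ts) = true →
    (ts.foldl pvStepA (best :: acc)).reverse = acc.reverse ++ pvGoC best ts := by
  induction ts with
  | nil => intro best acc _; simp [pvGoC]
  | cons t ts ih =>
    intro best acc hc
    obtain ⟨hrun, hrest⟩ := preChk_cons best (t :: ts) hc
    obtain ⟨hrun_t, hrest2⟩ := preChk_cons t ts hrest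
    rw [List.foldl_cons]
    by_cases hp : t.toList.take 8 = best.toList.take 8
    · obtain ⟨hg, hrun'⟩ := runGood_cons_pos best t ts hp hrun
      have hstep : pvStepA (best :: acc) t =
          (if pvLtC (best.toList.drop 8) (t.toList.drop 8) then best else t) :: acc := by
        rw [stepA_cons, if_neg (not_not_intro hp), isFirstA_eval _ _ hg]
        cases hlt : pvLtC (best.toList.drop 8) (t.toList.drop 8) <;> rfl
      rw [hstep]
      have hchk' : pvPreChkR
          ((if pvLtC (best.toList.drop 8) (t.toList.drop 8) then best else t) :: ts) = true := by
        split
        · rw [pvPreChkR, hrun', hrest2]; rfl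
        · exact hrest
      rw [ih _ acc hchk']
      rw [pvGoC, if_pos hp]
    · rw [stepA_cons, if_pos hp]
      rw [ih t (best :: acc) hrest]
      rw [pvGoC, if_neg hp]
      simp

-- grouping: recursion computed by B's fold (group g open, first element g.headI)
def pvGrpAux (g : List String) : List String → List (List String)
  | [] => [g]
  | t :: ts =>
    if g.headI.toList.take 8 = t.toList.take 8 then pvGrpAux (g ++ [t]) ts
    else g :: pvGrpAux [t] ts

theorem grpFold (ts : List String) : ∀ (g0 : String) (gr : List String) (rest : List (List String)),
    ts.foldl pvGroupStepB ((g0 :: gr) :: rest) = (pvGrpAux (g0 :: gr) ts).reverse ++ rest := by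
  induction ts with
  | nil => intro g0 gr rest; simp [pvGrpAux]
  | cons t ts ih =>
    intro g0 gr rest
    rw [List.foldl_cons, pvGroupStepB]
    by_cases hp : g0.toList.take 8 = t.toList.take 8
    · rw [if_pos hp, pvGrpAux]
      simp only [List.headI, if_pos hp]
      exact ih g0 (gr ++ [t]) rest
    · rw [if_neg hp, pvGrpAux]
      simp only [List.headI, if_neg hp]
      rw [ih t [] ((g0 :: gr) :: rest)]
      simp

-- total per-group reduction
def pvBestC (g0 : String) (gr : List String) : String :=
  gr.foldl (fun b t => if pvLtC (b.toList.drop 8) (t.toList.drop 8) then b else t) g0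

theorem bestC_mem (gr : List String) : ∀ g0, pvBestC g0 gr = g0 ∨ pvBestC g0 gr ∈ gr := by
  induction gr with
  | nil => intro g0; left; rfl
  | cons t ts ih =>
    intro g0
    have h := ih (if pvLtC (g0.toList.drop 8) (t.toList.drop 8) then g0 else t)
    simp only [pvBestC, List.foldl_cons] at h ⊢
    rcases h with h | h
    · rw [h]
      split
      · left; rfl
      · right; simp
    · right
      simp [h]

theorem bestB_eval (gr : List String) : ∀ g0, (∀ t ∈ gr, pvGoodS g0 t) →
    List.Pairwise pvGoodS gr → pvBestB g0 gr = some (pvBestC g0 gr) := by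
  induction gr with
  | nil => intro g0 _ _; rfl
  | cons t ts ih =>
    intro g0 h0 hpw
    rcases List.pairwise_cons.mp hpw with ⟨ht, hpw'⟩
    rw [pvBestB, sufLtB_eval _ _ (h0 t (by simp))]
    by_cases hlt : pvLtC (g0.toList.drop 8) (t.toList.drop 8) = true
    · rw [hlt]
      dsimp only
      rw [ih g0 (fun x hx => h0 x (by simp [hx])) hpw']
      simp [pvBestC, List.foldl_cons, hlt]
    · rw [Bool.not_eq_true] at hlt
      rw [hlt]
      dsimp only
      rw [ih t ht hpw']
      simp [pvBestC, List.foldl_cons, hlt]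

-- flushing one complete group appends its reduction
theorem emit_eval (g0 : String) (gr out : List String)
    (hpw : List.Pairwise pvGoodS (g0 :: gr)) :
    pvEmitStepB out (g0 :: gr) = out ++ [pvBestC g0 gr] := by
  rcases List.pairwise_cons.mp hpw with ⟨h0, hpw'⟩
  cases gr with
  | nil => rfl
  | cons t1 tr =>
    rw [pvEmitStepB, bestB_eval (t1 :: tr) g0 h0 hpw']

-- the best of an open group shares its first element's prefix
theorem bestC_take (g0 : String) (gr : List String)
    (hpre : ∀ x ∈ gr, x.toList.take 8 = g0.toList.take 8) :
    (pvBestC g0 gr).toList.take 8 = g0.toList.take 8 := by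
  rcases bestC_mem gr g0 with h | h
  · rw [h]
  · exact hpre _ h

theorem B_loop (ts : List String) : ∀ (g0 : String) (gr : List String) (out : List String),
    (∀ x ∈ gr, x.toList.take 8 = g0.toList.take 8) →
    List.Pairwise pvGoodS (g0 :: gr) →
    (∀ x ∈ g0 :: gr, pvRunGood x ts = true) →
    pvPreChkR ts = true →
    (pvGrpAux (g0 :: gr) ts).foldl pvEmitStepB out = out ++ pvGoC (pvBestC g0 gr) ts := by
  induction ts with
  | nil =>
    intro g0 gr out hpre hpw _ _
    rw [pvGrpAux, List.foldl_cons, List.foldl_nil, emit_eval g0 gr out hpw]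
    rfl
  | cons t ts ih =>
    intro g0 gr out hpre hpw hrun hchk
    obtain ⟨hrun_t, hchk'⟩ := preChk_cons t ts hchk
    have hbp := bestC_take g0 gr hpre
    rw [pvGrpAux]
    simp only [List.headI]
    by_cases hp : g0.toList.take 8 = t.toList.take 8
    · rw [if_pos hp]
      have hpre' : ∀ x ∈ gr ++ [t], x.toList.take 8 = g0.toList.take 8 := by
        intro x hx
        rcases List.mem_append.mp hx with hx | hx
        · exact hpre x hx
        · simp only [List.mem_singleton] at hx; subst hx; exact hp.symm
      have hxg : ∀ x ∈ g0 :: gr, pvGoodS x t ∧ pvRunGood x ts = true := by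
        intro x hx
        have hxt : t.toList.take 8 = x.toList.take 8 := by
          rcases List.mem_cons.mp hx with rfl | hx'
          · exact hp.symm
          · rw [hp.symm, hpre x hx']
        exact runGood_cons_pos x t ts hxt (hrun x hx)
      have hpw' : List.Pairwise pvGoodS (g0 :: (gr ++ [t])) := by
        have : List.Pairwise pvGoodS ((g0 :: gr) ++ [t]) := by
          rw [List.pairwise_append]
          exact ⟨hpw, List.pairwise_singleton _ _,
            fun a ha b hb => by
              simp only [List.mem_singleton] at hb; subst hb
              exact (hxg a ha).1⟩
        simpa using this
      have hrun' : ∀ x ∈ g0 :: (gr ++ [t]), pvRunGood x ts = true := by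
        intro x hx
        rcases List.mem_cons.mp hx with rfl | hx'
        · exact (hxg x (by simp)).2
        · rcases List.mem_append.mp hx' with hx'' | hx''
          · exact (hxg x (by simp [hx''])).2
          · simp only [List.mem_singleton] at hx''; subst hx''; exact hrun_t
      simp only [List.cons_append]
      rw [ih g0 (gr ++ [t]) out hpre' hpw' hrun' hchk']
      congr 1
      rw [pvGoC, if_pos (by rw [hbp]; exact hp.symm)]
      congr 1
      simp [pvBestC, List.foldl_append]
    · rw [if_neg hp, List.foldl_cons, emit_eval g0 gr out hpw,
        ih t [] (out ++ [pvBestC g0 gr]) (by simp) (List.pairwise_singleton _ _)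
          (by intro x hx; simp only [List.mem_singleton] at hx; subst hx; exact hrun_t) hchk']
      rw [pvGoC, if_neg (by rw [hbp]; exact fun e => hp e.symm)]
      simp [pvBestC]

-- ===== VERDICT (by name: the statement is the Claim_ definition above) =====
theorem get_second_first_spec : Claim_equal_get_second_first := by
  intro times _ hpre
  unfold Spec_get_second_first
  cases times with
  | nil => rfl
  | cons t ts =>
    have hpre' : pvPreChkR (t :: ts) = true := by rw [← preChk_eq]; exact hpre
    obtain ⟨hrun_t, hchk⟩ := preChk_cons t ts hpre'
    have hA : get_second_first (t :: ts) = pvGoC t ts := by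
      rw [get_second_first, List.foldl_cons]
      have hii : pvIsFirstA (t.toList.drop 8) (t.toList.drop 8) = some false := by
        rw [pvIsFirstA]
        unfold pvCmpA
        simp
      have h0 : pvStepA [] t = [t] := by
        rw [pvStepA]
        simp [hii]
      rw [h0]
      simpa using A_loop ts t [] hpre'
    have hB : get_second_first_alt (t :: ts) = pvGoC t ts := by
      rw [get_second_first_alt, pvGroupsB, List.foldl_cons]
      have h0 : pvGroupStepB [] t = [[t]] := rfl
      rw [h0, grpFold ts t [] [], List.append_nil, List.reverse_reverse]
      simpa using B_loop ts t [] [] (by simp) (List.pairwise_singleton _ _)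
        (by intro x hx; simp only [List.mem_singleton] at hx; subst hx; exact hrun_t) hchk
    rw [hA, hB]
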